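-- pv_equiv track=rewrite | github.com/sergiopineiro/tfg-automatitation-polybench-python | PolyPy/tests/benchmark_functions.py | scop_mvt
-- ===== SOURCE A (Python) =====
-- def scop_mvt(_PB_N, A, x1, x2, y_1, y_2):
--     for i in range(_PB_N):
--         for j in range(_PB_N):
--             x1[i] = x1[i] + A[i][j] * y_1[j]
--     for i in range(_PB_N):
--         for j in range(_PB_N):
--             x2[i] = x2[i] + A[j][i] * y_2[j]
--
--     return (_PB_N, A, x1, x2, y_1, y_2)
-- ===== SOURCE B (Python) =====
-- def scop_mvt(_PB_N, A, x1, x2, y_1, y_2):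
--     # One fused pass: x1[i] += A[i][j]*y_1[j] and x2[j] += A[i][j]*y_2[i],
--     # reading each A entry once. Mutates x1 and x2 in place, like the original.
--     for i in range(_PB_N):
--         Ai = A[i]
--         y2i = y_2[i]
--         s = x1[i]
--         for j in range(_PB_N):
--             a = Ai[j]
--             s += a * y_1[j]
--             x2[j] += a * y2i
--         x1[i] = s
--     return (_PB_N, A, x1, x2, y_1, y_2)
-- ===== Notes on version B (the rewrite author's own statement) =====
-- stated objective: alternative
-- what changed: Replaces A's two separate O(n^2) passes (row-wise x1+=A.y1, then column-wise x2 via A[j][i]) with one fused double loop that reads each A entry exactly once, accumulating x1[i] in a scalar and scattering x2[j] += A[i][j]*y_2[i] in the same inner loop.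
import Mathlib
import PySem

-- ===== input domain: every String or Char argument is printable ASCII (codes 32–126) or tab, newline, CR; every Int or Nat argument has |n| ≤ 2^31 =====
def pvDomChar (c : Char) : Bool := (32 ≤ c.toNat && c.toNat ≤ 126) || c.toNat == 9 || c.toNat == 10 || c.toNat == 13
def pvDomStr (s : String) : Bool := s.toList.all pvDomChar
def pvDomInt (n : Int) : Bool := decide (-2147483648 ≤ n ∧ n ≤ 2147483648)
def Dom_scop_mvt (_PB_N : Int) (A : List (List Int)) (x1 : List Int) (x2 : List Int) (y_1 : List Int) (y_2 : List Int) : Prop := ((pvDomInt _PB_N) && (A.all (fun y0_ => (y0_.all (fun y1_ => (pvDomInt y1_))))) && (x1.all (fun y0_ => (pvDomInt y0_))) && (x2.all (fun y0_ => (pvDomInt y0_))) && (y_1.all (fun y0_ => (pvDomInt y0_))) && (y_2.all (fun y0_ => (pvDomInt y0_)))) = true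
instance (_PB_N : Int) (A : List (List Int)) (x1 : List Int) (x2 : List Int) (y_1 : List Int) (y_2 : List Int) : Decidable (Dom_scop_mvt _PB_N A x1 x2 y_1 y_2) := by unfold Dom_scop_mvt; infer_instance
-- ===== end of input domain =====

-- B fuses A's two quadratic passes into one double loop that reads each A entry once
-- (objective: alternative decomposition, same O(n^2) cost); both A and B mutate x1/x2 in
-- place in Python, identically — the proof is about the returned tuple.

-- ===== PORT A =====
def scop_mvt (_PB_N : Int) (A : List (List Int)) (x1 : List Int) (x2 : List Int) (y_1 : List Int) (y_2 : List Int) : Int × List (List Int) × List Int × List Int × List Int × List Int :=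
  let x1f := (PySem.List.pyRange 0 _PB_N 1).foldl (fun x1 i =>
    (PySem.List.pyRange 0 _PB_N 1).foldl (fun x1 j =>
      PySem.List.pySetD x1 i (PySem.List.pyGetD x1 i 0 +
        PySem.List.pyGetD (PySem.List.pyGetD A i []) j 0 * PySem.List.pyGetD y_1 j 0)) x1) x1
  let x2f := (PySem.List.pyRange 0 _PB_N 1).foldl (fun x2 i =>
    (PySem.List.pyRange 0 _PB_N 1).foldl (fun x2 j =>
      PySem.List.pySetD x2 i (PySem.List.pyGetD x2 i 0 +
        PySem.List.pyGetD (PySem.List.pyGetD A j []) i 0 * PySem.List.pyGetD y_2 j 0)) x2) x2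
  (_PB_N, A, x1f, x2f, y_1, y_2)

-- ===== PORT B =====
def scop_mvt_alt (_PB_N : Int) (A : List (List Int)) (x1 : List Int) (x2 : List Int) (y_1 : List Int) (y_2 : List Int) : Int × List (List Int) × List Int × List Int × List Int × List Int :=
  let p := (PySem.List.pyRange 0 _PB_N 1).foldl (fun (p : List Int × List Int) i =>
    let Ai := PySem.List.pyGetD A i []
    let y2i := PySem.List.pyGetD y_2 i 0
    let s0 := PySem.List.pyGetD p.1 i 0
    let q := (PySem.List.pyRange 0 _PB_N 1).foldl (fun (q : Int × List Int) j =>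
        let a := PySem.List.pyGetD Ai j 0
        (q.1 + a * PySem.List.pyGetD y_1 j 0,
         PySem.List.pySetD q.2 j (PySem.List.pyGetD q.2 j 0 + a * y2i))) (s0, p.2)
    (PySem.List.pySetD p.1 i q.1, q.2)) (x1, x2)
  (_PB_N, A, p.1, p.2, y_1, y_2)

-- ===== PRECONDITION & SPEC =====
-- Pre_ excludes exactly the inputs where the Python A raises IndexError: some list
-- (or a used row of A) shorter than _PB_N.  (Vacuous when _PB_N ≤ 0.)
def Pre_scop_mvt (_PB_N : Int) (A : List (List Int)) (x1 : List Int) (x2 : List Int) (y_1 : List Int) (y_2 : List Int) : Prop :=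
  _PB_N ≤ (x1.length : Int) ∧ _PB_N ≤ (x2.length : Int) ∧ _PB_N ≤ (y_1.length : Int) ∧
  _PB_N ≤ (y_2.length : Int) ∧ _PB_N ≤ (A.length : Int) ∧
  ∀ row ∈ A.take _PB_N.toNat, _PB_N ≤ (row.length : Int)
instance (_PB_N : Int) (A : List (List Int)) (x1 : List Int) (x2 : List Int) (y_1 : List Int) (y_2 : List Int) : Decidable (Pre_scop_mvt _PB_N A x1 x2 y_1 y_2) := by unfold Pre_scop_mvt; infer_instance

def pvWitness_scop_mvt : Int × List (List Int) × List Int × List Int × List Int × List Int :=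
  (1, [[2]], [3], [4], [5], [6])

def Spec_scop_mvt (_PB_N : Int) (A : List (List Int)) (x1 : List Int) (x2 : List Int) (y_1 : List Int) (y_2 : List Int) (out : Int × List (List Int) × List Int × List Int × List Int × List Int) : Prop := out = scop_mvt_alt _PB_N A x1 x2 y_1 y_2
instance (_PB_N : Int) (A : List (List Int)) (x1 : List Int) (x2 : List Int) (y_1 : List Int) (y_2 : List Int) (out : Int × List (List Int) × List Int × List Int × List Int × List Int) : Decidable (Spec_scop_mvt _PB_N A x1 x2 y_1 y_2 out) := by unfold Spec_scop_mvt; infer_instance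

-- ===== CLAIM (what is proved, stated in full; the proofs are below) =====
def Claim_equal_scop_mvt : Prop := ∀ (_PB_N : Int) (A : List (List Int)) (x1 : List Int) (x2 : List Int) (y_1 : List Int) (y_2 : List Int), Dom_scop_mvt _PB_N A x1 x2 y_1 y_2 → Pre_scop_mvt _PB_N A x1 x2 y_1 y_2 → Spec_scop_mvt _PB_N A x1 x2 y_1 y_2 (scop_mvt _PB_N A x1 x2 y_1 y_2)

-- ===== LEMMAS AND PROOFS =====

-- pySetD at a nonnegative out-of-range index is the identity
theorem pvSetD_oob (xs : List Int) (i : Int) (v : Int) (h : (xs.length : Int) ≤ i) :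
    PySem.List.pySetD xs i v = xs := by
  have hn : PySem.List.pySet? xs i v = none := by
    rw [PySem.List.pySet?_eq_none_iff]
    simp [PySem.Raise.InRange]
    omega
  simp [PySem.List.pySetD, hn]

-- a loop that repeatedly adds into one fixed slot i equals one combined update of slot i
theorem pvInnerSet (js : List Int) (xs : List Int) (i : Int) (hi : 0 ≤ i) (f : Int → Int) :
    js.foldl (fun xs j => PySem.List.pySetD xs i (PySem.List.pyGetD xs i 0 + f j)) xs
      = PySem.List.pySetD xs i (PySem.List.pyGetD xs i 0 + (js.map f).sum) := by
  induction js generalizing xs with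
  | nil =>
      simp only [List.foldl_nil, List.map_nil, List.sum_nil, add_zero]
      rcases (by omega : i < (xs.length : Int) ∨ (xs.length : Int) ≤ i) with hlt | hge
      · rw [PySem.List.pyGetD_eq_getElem xs 0 hi hlt, PySem.List.pySetD_of_nonneg xs _ hi]
        exact (List.set_getElem_self (by omega)).symm
      · rw [pvSetD_oob _ _ _ hge]
  | cons j js ih =>
      simp only [List.foldl_cons, List.map_cons, List.sum_cons]
      rw [ih]
      rcases (by omega : i < (xs.length : Int) ∨ (xs.length : Int) ≤ i) with hlt | hge
      · obtain ⟨n, rfl⟩ : ∃ n : Nat, (n : Int) = i := ⟨i.toNat, Int.toNat_of_nonneg hi⟩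
        have hn : n < xs.length := by exact_mod_cast hlt
        rw [PySem.List.pyGetD_pySetD_natCast xs n n _ 0 hn]
        simp only [PySem.List.pySetD_natCast, List.set_set, if_pos]
        simp [add_assoc]
      · simp only [pvSetD_oob _ _ _ hge]

-- a loop over i = 0..n-1 that rewrites slot i once equals a single indexed map
theorem pvOuterSet (n : Nat) (h : Int → Int) (xs : List Int) :
    (PySem.List.pyRange 0 (n : Int) 1).foldl
        (fun xs i => PySem.List.pySetD xs i (PySem.List.pyGetD xs i 0 + h i)) xs
      = xs.mapIdx (fun k v => if k < n then v + h (k : Int) else v) := by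
  induction n with
  | zero =>
      rw [PySem.List.pyRange_one_eq_nil (by omega)]
      refine (List.ext_getElem (by simp) ?_).symm
      intro k hk1 hk2
      simp
  | succ n ih =>
      have hcast : ((n + 1 : Nat) : Int) = (n : Int) + 1 := by push_cast; ring
      rw [hcast, PySem.List.pyRange_one_succ_right (by omega), List.foldl_append,
        List.foldl_cons, List.foldl_nil, ih]
      rcases (by omega : n < xs.length ∨ xs.length ≤ n) with hlt | hge
      · have hlen : n < (List.mapIdx (fun k v => if k < n then v + h (k : Int) else v) xs).length := by
          simpa using hlt
        rw [PySem.List.pyGetD_eq_getElem _ 0 (by positivity) (by simpa using hlt),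
          PySem.List.pySetD_of_nonneg _ _ (by positivity)]
        simp only [Int.toNat_natCast]
        apply List.ext_getElem
        · simp
        · intro k hk1 hk2
          simp only [List.getElem_set, List.getElem_mapIdx]
          by_cases hkn : k = n
          · subst hkn
            simp
          · have hne : ¬ n = k := fun hc => hkn hc.symm
            simp only [if_neg hne]
            by_cases h1 : k < n
            · simp [h1, Nat.lt_succ_of_lt h1]
            · have h2 : ¬ k < n + 1 := by omega
              simp [h1, h2]
      · rw [pvSetD_oob _ _ _ (by simpa using hge)]
        apply List.ext_getElem
        · simp
        · intro k hk1 hk2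
          simp only [List.getElem_mapIdx]
          have hk : k < xs.length := by simpa using hk1
          have h1 : k < n := by omega
          simp [h1, Nat.lt_succ_of_lt h1]

-- folding per-row indexed increments accumulates, slot by slot, the sum over rows
theorem pvFoldMapIdx (is : List Int) (n : Nat) (c : Int → Int → Int) (xs : List Int) :
    is.foldl (fun xs i => xs.mapIdx (fun k v => if k < n then v + c i (k : Int) else v)) xs
      = xs.mapIdx (fun k v => if k < n then v + (is.map (fun i => c i (k : Int))).sum else v) := by
  induction is generalizing xs with
  | nil =>
      apply List.ext_getElem
      · simp
      · intro k hk1 hk2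
        simp only [List.foldl_nil, List.getElem_mapIdx, List.map_nil, List.sum_nil, add_zero]
        split <;> rfl
  | cons a is ih =>
      rw [List.foldl_cons, ih]
      apply List.ext_getElem
      · simp
      · intro k hk1 hk2
        simp only [List.getElem_mapIdx, List.map_cons, List.sum_cons]
        split <;> ring

-- ===== VERDICT (by name: the statement is the Claim_ definition above) =====
theorem scop_mvt_spec : Claim_equal_scop_mvt := by
  unfold Claim_equal_scop_mvt
  intro N A x1 x2 y_1 y_2 _hdom _hpre
  unfold Spec_scop_mvt scop_mvt scop_mvt_alt
  rcases (by omega : N ≤ 0 ∨ 0 < N) with hN | hN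
  · rw [PySem.List.pyRange_one_eq_nil hN]
    simp
  · obtain ⟨n, rfl⟩ : ∃ n : Nat, (n : Int) = N := ⟨N.toNat, Int.toNat_of_nonneg hN.le⟩
    -- A's first pass
    have hA1 : ∀ xs : List Int,
        (PySem.List.pyRange 0 (n : Int) 1).foldl (fun x1 i =>
          (PySem.List.pyRange 0 (n : Int) 1).foldl (fun x1 j =>
            PySem.List.pySetD x1 i (PySem.List.pyGetD x1 i 0 +
              PySem.List.pyGetD (PySem.List.pyGetD A i []) j 0 * PySem.List.pyGetD y_1 j 0)) x1) xs
        = xs.mapIdx (fun k v => if k < n then v +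
            ((PySem.List.pyRange 0 (n : Int) 1).map (fun j =>
              PySem.List.pyGetD (PySem.List.pyGetD A (k : Int) []) j 0 * PySem.List.pyGetD y_1 j 0)).sum
          else v) := by
      intro xs
      rw [PySem.List.foldl_congr_mem _ _
        (fun xs i => PySem.List.pySetD xs i (PySem.List.pyGetD xs i 0 +
          ((PySem.List.pyRange 0 (n : Int) 1).map (fun j =>
            PySem.List.pyGetD (PySem.List.pyGetD A i []) j 0 * PySem.List.pyGetD y_1 j 0)).sum)) xs
        (fun acc i hi => pvInnerSet _ acc i ((PySem.List.mem_pyRange_one.1 hi).1) _)]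
      exact pvOuterSet n _ xs
    -- A's second pass
    have hA2 : ∀ xs : List Int,
        (PySem.List.pyRange 0 (n : Int) 1).foldl (fun x2 i =>
          (PySem.List.pyRange 0 (n : Int) 1).foldl (fun x2 j =>
            PySem.List.pySetD x2 i (PySem.List.pyGetD x2 i 0 +
              PySem.List.pyGetD (PySem.List.pyGetD A j []) i 0 * PySem.List.pyGetD y_2 j 0)) x2) xs
        = xs.mapIdx (fun k v => if k < n then v +
            ((PySem.List.pyRange 0 (n : Int) 1).map (fun j =>
              PySem.List.pyGetD (PySem.List.pyGetD A j []) (k : Int) 0 * PySem.List.pyGetD y_2 j 0)).sum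
          else v) := by
      intro xs
      rw [PySem.List.foldl_congr_mem _ _
        (fun xs i => PySem.List.pySetD xs i (PySem.List.pyGetD xs i 0 +
          ((PySem.List.pyRange 0 (n : Int) 1).map (fun j =>
            PySem.List.pyGetD (PySem.List.pyGetD A j []) i 0 * PySem.List.pyGetD y_2 j 0)).sum)) xs
        (fun acc i hi => pvInnerSet _ acc i ((PySem.List.mem_pyRange_one.1 hi).1) _)]
      exact pvOuterSet n _ xs
    -- B's fused loop, rewritten as a product of two independent folds
    have hB : (PySem.List.pyRange 0 (n : Int) 1).foldl (fun (p : List Int × List Int) i =>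
        let Ai := PySem.List.pyGetD A i []
        let y2i := PySem.List.pyGetD y_2 i 0
        let s0 := PySem.List.pyGetD p.1 i 0
        let q := (PySem.List.pyRange 0 (n : Int) 1).foldl (fun (q : Int × List Int) j =>
            let a := PySem.List.pyGetD Ai j 0
            (q.1 + a * PySem.List.pyGetD y_1 j 0,
             PySem.List.pySetD q.2 j (PySem.List.pyGetD q.2 j 0 + a * y2i))) (s0, p.2)
        (PySem.List.pySetD p.1 i q.1, q.2)) (x1, x2)
      = ((PySem.List.pyRange 0 (n : Int) 1).foldl (fun x1 i =>
           PySem.List.pySetD x1 i (PySem.List.pyGetD x1 i 0 +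
             ((PySem.List.pyRange 0 (n : Int) 1).map (fun j =>
               PySem.List.pyGetD (PySem.List.pyGetD A i []) j 0 * PySem.List.pyGetD y_1 j 0)).sum)) x1,
         (PySem.List.pyRange 0 (n : Int) 1).foldl (fun x2 i =>
           x2.mapIdx (fun k v => if k < n then v +
             PySem.List.pyGetD (PySem.List.pyGetD A i []) (k : Int) 0 * PySem.List.pyGetD y_2 i 0
           else v)) x2) := by
      rw [PySem.List.foldl_congr_mem _ _
        (fun (p : List Int × List Int) i =>
          (PySem.List.pySetD p.1 i (PySem.List.pyGetD p.1 i 0 +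
             ((PySem.List.pyRange 0 (n : Int) 1).map (fun j =>
               PySem.List.pyGetD (PySem.List.pyGetD A i []) j 0 * PySem.List.pyGetD y_1 j 0)).sum),
           p.2.mapIdx (fun k v => if k < n then v +
             PySem.List.pyGetD (PySem.List.pyGetD A i []) (k : Int) 0 * PySem.List.pyGetD y_2 i 0
           else v))) (x1, x2) ?_]
      · exact PySem.List.foldl_prod_mk
          (fun x1 i => PySem.List.pySetD x1 i (PySem.List.pyGetD x1 i 0 +
            ((PySem.List.pyRange 0 (n : Int) 1).map (fun j =>
              PySem.List.pyGetD (PySem.List.pyGetD A i []) j 0 * PySem.List.pyGetD y_1 j 0)).sum))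
          (fun x2 i => x2.mapIdx (fun k v => if k < n then v +
            PySem.List.pyGetD (PySem.List.pyGetD A i []) (k : Int) 0 * PySem.List.pyGetD y_2 i 0
          else v)) _ x1 x2
      · intro acc i _hi
        simp only
        rw [PySem.List.foldl_prod_mk
          (fun s j => s + PySem.List.pyGetD (PySem.List.pyGetD A i []) j 0 * PySem.List.pyGetD y_1 j 0)
          (fun x2 j => PySem.List.pySetD x2 j (PySem.List.pyGetD x2 j 0 +
            PySem.List.pyGetD (PySem.List.pyGetD A i []) j 0 * PySem.List.pyGetD y_2 i 0))]
        rw [PySem.List.foldl_add, pvOuterSet n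
          (fun j => PySem.List.pyGetD (PySem.List.pyGetD A i []) j 0 * PySem.List.pyGetD y_2 i 0) acc.2]
    simp only [hA1, hA2, hB, pvOuterSet]
    rw [pvFoldMapIdx (PySem.List.pyRange 0 (n : Int) 1) n
      (fun i t => PySem.List.pyGetD (PySem.List.pyGetD A i []) t 0 * PySem.List.pyGetD y_2 i 0) x2]
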